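-- pv_equiv track=rewrite | github.com/pradumana/identiQ | secure-kyc-chain/backend/app/services/transaction_analysis_service.py | _check_rapid_transactions
-- ===== SOURCE A (Python) =====
-- from typing import Dict, Any, List, Optional
--
-- def _check_rapid_transactions(transactions: List[Dict]) -> int:
--     """Check for rapid transactions (many in short time)"""
--     if len(transactions) < 2:
--         return 0
--
--     # Group by date (simplified - assumes same date = rapid)
--     date_counts = {}
--     for txn in transactions:
--         if txn.get('date'):
--             date = txn['date'].split()[0] if ' ' in txn['date'] else txn['date']
--             date_counts[date] = date_counts.get(date, 0) + 1
--
--     # Return max transactions per day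
--     return max(date_counts.values()) if date_counts else 0
-- ===== SOURCE B (Python) =====
-- from typing import Dict, Any, List, Optional
--
-- def _check_rapid_transactions(transactions: List[Dict]) -> int:
--     """Check for rapid transactions (many in short time)"""
--     if len(transactions) < 2:
--         return 0
--
--     # Collect the date key of every transaction that has one
--     dates = [txn['date'].split()[0] if ' ' in txn['date'] else txn['date']
--              for txn in transactions if txn.get('date')]
--
--     # Sort, then the answer is the longest run of equal consecutive dates
--     best = 0
--     run = 0
--     prev = None
--     for d in sorted(dates):
--         run = run + 1 if d == prev else 1
--         prev = d
--         if run > best: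
--             best = run
--     return best
-- ===== Notes on version B (the rewrite author's own statement) =====
-- stated objective: alternative
-- what changed: Replaces the hash-map date->count accumulation with a sort-then-scan: the extracted dates are sorted and the answer is computed as the longest run of equal consecutive dates with a running prev/run/best state, no counting container at all.
import Mathlib
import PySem

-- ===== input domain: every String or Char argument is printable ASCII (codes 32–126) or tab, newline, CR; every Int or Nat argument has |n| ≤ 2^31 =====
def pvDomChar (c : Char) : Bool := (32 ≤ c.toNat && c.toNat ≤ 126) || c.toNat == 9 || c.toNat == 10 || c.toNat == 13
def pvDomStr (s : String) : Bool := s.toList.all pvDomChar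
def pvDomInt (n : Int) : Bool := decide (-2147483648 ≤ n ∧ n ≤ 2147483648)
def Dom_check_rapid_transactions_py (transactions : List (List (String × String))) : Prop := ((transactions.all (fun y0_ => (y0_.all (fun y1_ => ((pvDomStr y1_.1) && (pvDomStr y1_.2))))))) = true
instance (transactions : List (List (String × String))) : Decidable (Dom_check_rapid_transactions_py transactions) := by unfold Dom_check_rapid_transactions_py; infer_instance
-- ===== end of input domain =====

-- B replaces A's hash-map date->count accumulation with a sort-then-scan: it sorts the
-- extracted dates and takes the longest run of equal consecutive dates (objective:
-- alternative algorithm, same results, no speed claim).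

-- ===== PORT A =====
-- shared date-extraction expression (identical in both Pythons):
--   txn['date'].split()[0] if ' ' in txn['date'] else txn['date']   guarded by  if txn.get('date')
-- the '.getD s' arm is the IndexError case (split()[0] on a whitespace-only date); Pre_ excludes it
def pvExtractDate (txn : List (String × String)) : Option String :=
  match List.lookup "date" txn with
  | some s =>
      if s ≠ "" then
        some (if s.toList.contains ' ' then (PySem.List.pyGet? (PySem.Str.split₀ s) 0).getD s else s)
      else none
  | none => none

def check_rapid_transactions_py (transactions : List (List (String × String))) : Int :=
  if transactions.length < 2 then 0
  else
    let date_counts :=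
      transactions.foldl (fun d txn =>
        match pvExtractDate txn with
        | some date => d.insert date (d.getD date 0 + 1)
        | none => d) (PySem.Dict.empty : PySem.Dict String Int)
    match PySem.List.max? date_counts.values (fun v => v) with
    | some m => m
    | none => 0

-- ===== PORT B =====
-- one iteration of Source B's loop body over the state (best, run, prev)
def pvScanStep (st : Int × Int × Option String) (d : String) : Int × Int × Option String :=
  let run := if some d = st.2.2 then st.2.1 + 1 else 1
  let best := if run > st.1 then run else st.1
  (best, run, some d)

def check_rapid_transactions_py_alt (transactions : List (List (String × String))) : Int :=
  if transactions.length < 2 then 0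
  else
    let dates := transactions.filterMap pvExtractDate
    ((PySem.List.sorted dates (fun x => x) false).foldl pvScanStep (0, 0, none)).1

-- ===== PRECONDITION & SPEC =====
-- Pre_ excludes exactly the inputs where both Pythons raise IndexError: a transaction whose
-- 'date' value is nonempty, contains a space, and is whitespace-only (so .split() is empty),
-- reached only when len(transactions) >= 2.
def pvDateOk (txn : List (String × String)) : Bool :=
  match List.lookup "date" txn with
  | some s => !(decide (s ≠ "") && s.toList.contains ' ' && (PySem.Str.split₀ s).isEmpty)
  | none => true

def Pre_check_rapid_transactions_py (transactions : List (List (String × String))) : Prop :=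
  transactions.length < 2 ∨ ∀ txn ∈ transactions, pvDateOk txn = true

instance (transactions : List (List (String × String))) : Decidable (Pre_check_rapid_transactions_py transactions) := by
  unfold Pre_check_rapid_transactions_py; infer_instance

def pvWitness_check_rapid_transactions_py : (List (List (String × String))) :=
  [[("date", "2024-01-01")], [("date", "2024-01-01 10:00"), ("amount", "5")]]

def Spec_check_rapid_transactions_py (transactions : List (List (String × String))) (out : Int) : Prop := out = check_rapid_transactions_py_alt transactions
instance (transactions : List (List (String × String))) (out : Int) : Decidable (Spec_check_rapid_transactions_py transactions out) := by unfold Spec_check_rapid_transactions_py; infer_instance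

-- ===== CLAIM (what is proved, stated in full; the proofs are below) =====
def Claim_equal_check_rapid_transactions_py : Prop := ∀ (transactions : List (List (String × String))), Dom_check_rapid_transactions_py transactions → Pre_check_rapid_transactions_py transactions → Spec_check_rapid_transactions_py transactions (check_rapid_transactions_py transactions)

-- ===== LEMMAS AND PROOFS =====

-- the common reference value: max over the distinct dates of their multiplicity
def pvCntMax (L : List String) : Int :=
  (PySem.List.dedup L).foldl (fun b k => max b ((L.count k : Int))) 0

-- recursive longest-run-of-equal-consecutive-elements (proof-only reference for B's scan)
def pvMaxRun : List String → Int
  | [] => 0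
  | h :: t =>
      max (1 + ((t.takeWhile (· == h)).length : Int)) (pvMaxRun (t.dropWhile (· == h)))
  termination_by l => l.length
  decreasing_by
    simpa using Nat.lt_succ_of_le (List.length_dropWhile_le _ _)

-- A's interleaved extract-and-count fold is the counting fold over the extracted list
lemma foldA_eq_filterMap (ts : List (List (String × String)))
    (d : PySem.Dict String Int) :
    ts.foldl (fun d txn =>
        match pvExtractDate txn with
        | some date => d.insert date (d.getD date 0 + 1)
        | none => d) d
      = (ts.filterMap pvExtractDate).foldl
          (fun d x => d.insert x (d.getD x 0 + 1)) d := by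
  induction ts generalizing d with
  | nil => rfl
  | cons h t ih =>
      simp only [List.foldl_cons, List.filterMap_cons]
      cases pvExtractDate h <;> simp [ih]

lemma init_le_foldl_maxf (c : String → Int) (l : List String) (i : Int) :
    i ≤ l.foldl (fun b k => max b (c k)) i := by
  induction l generalizing i with
  | nil => simp
  | cons h t ih => exact le_trans (le_max_left i (c h)) (ih _)

lemma foldl_max_init (c : String → Int) (l : List String) (x y : Int) :
    l.foldl (fun b k => max b (c k)) (max x y)
      = max x (l.foldl (fun b k => max b (c k)) y) := by
  induction l generalizing y with
  | nil => rfl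
  | cons h t ih =>
      simp only [List.foldl_cons]
      rw [max_assoc, ih]

lemma cntMax_nonneg (L : List String) : 0 ≤ pvCntMax L :=
  init_le_foldl_maxf _ _ _

-- A's max-of-counter-values equals pvCntMax
lemma A_value_eq_cntMax (L : List String) :
    (match PySem.List.max? (PySem.Dict.counter L).values (fun v => v) with
     | some m => m
     | none => 0) = pvCntMax L := by
  have hvals : (PySem.Dict.counter L).values
      = (PySem.List.dedup L).map (fun k => (L.count k : Int)) := by
    show ((PySem.Dict.counter L).items.map (·.2))
        = (PySem.List.dedup L).map (fun k => (L.count k : Int))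
    rw [PySem.Dict.items_counter]
    simp [List.map_map, Function.comp]
  rw [hvals]
  cases hd : PySem.List.dedup L with
  | nil =>
      unfold pvCntMax
      rw [hd]
      simp [PySem.List.max?]
  | cons k t =>
      rw [List.map_cons, PySem.List.max?_id_cons]
      have hk1 : (1 : Int) ≤ (L.count k : Int) := by
        have : k ∈ L := (PySem.List.mem_dedup L k).mp (hd ▸ List.mem_cons_self ..)
        exact_mod_cast List.one_le_count_iff.mpr this
      simp only [List.foldl_map]
      unfold pvCntMax
      rw [hd, List.foldl_cons]
      have h0 : max (0 : Int) ((L.count k : Int)) = (L.count k : Int) := by omega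
      rw [h0]

-- pvCntMax is permutation-invariant
lemma cntMax_perm (L S : List String) (hp : S.Perm L) : pvCntMax L = pvCntMax S := by
  unfold pvCntMax
  have hcong : (PySem.List.dedup S).foldl (fun b k => max b ((L.count k : Int))) 0
      = (PySem.List.dedup S).foldl (fun b k => max b ((S.count k : Int))) 0 := by
    refine PySem.List.foldl_congr_mem _ _ _ _ (fun acc x _ => ?_)
    rw [hp.count_eq]
  rw [← hcong]
  have hdperm : (PySem.List.dedup L).Perm (PySem.List.dedup S) := by
    refine (List.perm_ext_iff_of_nodup (PySem.List.nodup_dedup L) (PySem.List.nodup_dedup S)).mpr ?_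
    intro a
    rw [PySem.List.mem_dedup, PySem.List.mem_dedup, hp.mem_iff]
  exact List.Perm.foldl_eq (f := fun b k => max b ((L.count k : Int)))
    (rcomm := ⟨fun b x y => max_right_comm b _ _⟩) hdperm 0

-- first-occurrence dedup: pushing a fresh head out of the Set.add fold
lemma foldl_add_cons_of_not_mem (h : String) (l : List String) (hl : h ∉ l) (s : List String) :
    l.foldl PySem.Set.add (h :: s) = h :: l.foldl PySem.Set.add s := by
  induction l generalizing s with
  | nil => rfl
  | cons x t ih =>
      have hxh : x ≠ h := fun e => hl (e ▸ List.mem_cons_self ..)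
      have hstep : PySem.Set.add (h :: s) x = h :: PySem.Set.add s x := by
        have hb : (x == h) = false := by simp [hxh]
        simp only [PySem.Set.add, PySem.Set.contains, List.contains_cons, hb, Bool.false_or]
        split <;> rfl
      simp only [List.foldl_cons, hstep]
      exact ih (fun hm => hl (List.mem_cons_of_mem _ hm)) _

lemma foldl_add_run (h : String) : ∀ (r : List String), (∀ x ∈ r, x = h) →
    r.foldl PySem.Set.add [h] = [h] := by
  intro r
  induction r with
  | nil => intro _; rfl
  | cons x t ih =>
      intro hr
      have hx : x = h := hr x (List.mem_cons_self ..)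
      have hstep : PySem.Set.add [h] x = [h] := by
        simp [PySem.Set.add, PySem.Set.contains, hx]
      simp only [List.foldl_cons, hstep]
      exact ih (fun y hy => hr y (List.mem_cons_of_mem _ hy))

lemma dedup_run_cons (h : String) (r rest : List String)
    (hr : ∀ x ∈ r, x = h) (hrest : h ∉ rest) :
    PySem.List.dedup (h :: (r ++ rest)) = h :: PySem.List.dedup rest := by
  have e1 : PySem.List.dedup (h :: (r ++ rest)) = (r ++ rest).foldl PySem.Set.add [h] := rfl
  rw [e1, List.foldl_append]
  rw [foldl_add_run h r hr]
  exact foldl_add_cons_of_not_mem h rest hrest []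

-- every element of the dropWhile part of a sorted tail differs from the head value
lemma dropWhile_ne_head (h : String) (t : List String)
    (hle : ∀ x ∈ t, h ≤ x) (hpw : t.Pairwise (· ≤ ·)) :
    ∀ x ∈ t.dropWhile (· == h), x ≠ h := by
  intro x hx heq
  rcases hd : t.dropWhile (· == h) with _ | ⟨a, l⟩
  · rw [hd] at hx; simp at hx
  · have hhead := List.head?_dropWhile_not (· == h) t
    rw [hd] at hhead hx
    simp only [List.head?_cons] at hhead
    have hah : a ≠ h := by simpa using hhead
    have hsub : (a :: l).Sublist t := hd ▸ List.dropWhile_sublist _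
    have hha : h ≤ a := hle a (hsub.mem (List.mem_cons_self ..))
    rcases List.mem_cons.mp hx with hxa | hxl
    · exact hah (hxa ▸ heq)
    · have hax : a ≤ x := (List.pairwise_cons.mp (hpw.sublist hsub)).1 x hxl
      exact hah (le_antisymm (heq ▸ hax) hha)

-- on a sorted list, the longest run of equal consecutive elements is the max multiplicity
lemma maxRun_eq_cntMax : ∀ (n : Nat) (S : List String), S.length ≤ n →
    S.Pairwise (· ≤ ·) → pvMaxRun S = pvCntMax S := by
  intro n
  induction n with
  | zero =>
      intro S hlen _
      have : S = [] := List.eq_nil_of_length_eq_zero (Nat.le_zero.mp hlen)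
      subst this
      rw [pvMaxRun]; rfl
  | succ n ih =>
      intro S hlen hpw
      cases S with
      | nil => rw [pvMaxRun]; rfl
      | cons h t =>
          have hr : ∀ x ∈ t.takeWhile (· == h), x = h := fun x hx => by
            simpa using List.mem_takeWhile_imp hx
          have hle : ∀ x ∈ t, h ≤ x := (List.pairwise_cons.mp hpw).1
          have hpwt : t.Pairwise (· ≤ ·) := (List.pairwise_cons.mp hpw).2
          have hne : ∀ x ∈ t.dropWhile (· == h), x ≠ h := dropWhile_ne_head h t hle hpwt
          have hnotmem : h ∉ t.dropWhile (· == h) := fun hm => hne h hm rfl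
          have ht : t.takeWhile (· == h) ++ t.dropWhile (· == h) = t :=
            List.takeWhile_append_dropWhile
          have hdedup : PySem.List.dedup (h :: t)
              = h :: PySem.List.dedup (t.dropWhile (· == h)) := by
            conv_lhs => rw [← ht]
            exact dedup_run_cons h _ _ hr hnotmem
          have hcnt_r : (t.takeWhile (· == h)).count h = (t.takeWhile (· == h)).length :=
            List.count_eq_length.mpr (fun b hb => (hr b hb).symm)
          have hcnt_rest : (t.dropWhile (· == h)).count h = 0 :=
            List.count_eq_zero.mpr hnotmem
          have hth : t.count h = (t.takeWhile (· == h)).length := by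
            conv_lhs => rw [← ht]
            rw [List.count_append, hcnt_r, hcnt_rest, Nat.add_zero]
          have hcount_h : ((h :: t).count h : Int)
              = 1 + ((t.takeWhile (· == h)).length : Int) := by
            rw [List.count_cons_self, hth]
            push_cast
            omega
          have hcount_k : ∀ k ∈ PySem.List.dedup (t.dropWhile (· == h)),
              ((h :: t).count k : Int) = ((t.dropWhile (· == h)).count k : Int) := by
            intro k hk
            have hkrest : k ∈ t.dropWhile (· == h) := (PySem.List.mem_dedup _ _).mp hk
            have hkh : k ≠ h := hne k hkrest
            have hz : (t.takeWhile (· == h)).count k = 0 :=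
              List.count_eq_zero.mpr (fun hm => hkh (hr k hm))
            have h2 : t.count k = (t.dropWhile (· == h)).count k := by
              conv_lhs => rw [← ht]
              rw [List.count_append, hz, Nat.zero_add]
            have hne' : ¬ (h = k) := fun e => hkh e.symm
            simp [h2, hne']
          have hpwrest : (t.dropWhile (· == h)).Pairwise (· ≤ ·) :=
            hpwt.sublist (List.dropWhile_sublist _)
          have hlenrest : (t.dropWhile (· == h)).length ≤ n := by
            have h1 : (t.dropWhile (· == h)).length ≤ t.length :=
              List.length_dropWhile_le _ _
            have h2 : (h :: t).length = t.length + 1 := List.length_cons ..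
            omega
          have ihrest := ih _ hlenrest hpwrest
          rw [pvMaxRun, ihrest]
          have hrhs : pvCntMax (h :: t)
              = max (((h :: t).count h : Int)) (pvCntMax (t.dropWhile (· == h))) := by
            unfold pvCntMax
            rw [hdedup, List.foldl_cons]
            rw [PySem.List.foldl_congr_mem (PySem.List.dedup (t.dropWhile (· == h)))
                (fun b k => max b (((h :: t).count k : Int)))
                (fun b k => max b (((t.dropWhile (· == h)).count k : Int)))
                _ (fun acc x hx => by simp only [hcount_k x hx])]
            rw [max_comm (0 : Int), foldl_max_init]
          rw [hrhs, hcount_h]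

-- Source B's loop over a block of equal elements
lemma scan_run : ∀ (r : List String) (h : String) (b k : Int),
    (∀ x ∈ r, x = h) → k ≤ b →
    r.foldl pvScanStep (b, k, some h)
      = (max b (k + (r.length : Int)), k + (r.length : Int), some h) := by
  intro r
  induction r with
  | nil =>
      intro h b k _ hkb
      simp only [List.foldl_nil, List.length_nil, Int.natCast_zero, add_zero]
      rw [max_eq_left hkb]
  | cons x t ih =>
      intro h b k hall hkb
      have hx : x = h := hall x (List.mem_cons_self ..)
      subst hx
      simp only [List.foldl_cons]
      have hstep : pvScanStep (b, k, some x) x = (max b (k + 1), k + 1, some x) := by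
        simp [pvScanStep, Prod.ext_iff]
        omega
      rw [hstep,
        ih x (max b (k + 1)) (k + 1)
          (fun y hy => hall y (List.mem_cons_of_mem _ hy)) (le_max_right _ _)]
      have hlen : ((x :: t).length : Int) = (t.length : Int) + 1 := by
        rw [List.length_cons]; push_cast; ring
      refine Prod.ext ?_ (Prod.ext ?_ rfl) <;> simp only [hlen] <;> omega

-- Source B's scan over a sorted list computes max best (longest run)
lemma scan_sorted : ∀ (n : Nat) (S : List String), S.length ≤ n → S.Pairwise (· ≤ ·) →
    ∀ (best run : Int) (prev : Option String), 0 ≤ best →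
    (∀ x, S.head? = some x → prev ≠ some x) →
    (S.foldl pvScanStep (best, run, prev)).1 = max best (pvMaxRun S) := by
  intro n
  induction n with
  | zero =>
      intro S hlen _ best run prev hb _
      have : S = [] := List.eq_nil_of_length_eq_zero (Nat.le_zero.mp hlen)
      subst this
      simp only [List.foldl_nil, pvMaxRun]
      omega
  | succ n ih =>
      intro S hlen hpw best run prev hb hfresh
      cases S with
      | nil => simp only [List.foldl_nil, pvMaxRun]; omega
      | cons h t =>
          have hprev : some h ≠ prev := fun e => hfresh h rfl e.symm
          have hstep : pvScanStep (best, run, prev) h = (max best 1, 1, some h) := by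
            simp [pvScanStep, hprev, Prod.ext_iff]
            omega
          have hr : ∀ x ∈ t.takeWhile (· == h), x = h := fun x hx => by
            simpa using List.mem_takeWhile_imp hx
          have hle : ∀ x ∈ t, h ≤ x := (List.pairwise_cons.mp hpw).1
          have hpwt : t.Pairwise (· ≤ ·) := (List.pairwise_cons.mp hpw).2
          have hpwrest : (t.dropWhile (· == h)).Pairwise (· ≤ ·) :=
            hpwt.sublist (List.dropWhile_sublist _)
          have hlenrest : (t.dropWhile (· == h)).length ≤ n := by
            have h1 : (t.dropWhile (· == h)).length ≤ t.length :=
              List.length_dropWhile_le _ _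
            have h2 : (h :: t).length = t.length + 1 := List.length_cons ..
            omega
          have ht : t.takeWhile (· == h) ++ t.dropWhile (· == h) = t :=
            List.takeWhile_append_dropWhile
          have hfold : t.foldl pvScanStep (max best 1, 1, some h)
              = (t.dropWhile (· == h)).foldl pvScanStep
                  ((t.takeWhile (· == h)).foldl pvScanStep (max best 1, 1, some h)) := by
            conv_lhs => rw [← ht]
            rw [List.foldl_append]
          have hfresh' : ∀ x, (t.dropWhile (· == h)).head? = some x →
              (some h : Option String) ≠ some x := by
            intro x hx e
            have hhead := List.head?_dropWhile_not (· == h) t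
            rw [hx] at hhead
            have : (x == h) = false := hhead
            exact (by simpa using this : x ≠ h) (Option.some.inj e).symm
          rw [List.foldl_cons, hstep, hfold,
            scan_run _ h (max best 1) 1 hr (le_max_right _ _),
            ih _ hlenrest hpwrest _ _ _ (by omega) hfresh']
          rw [pvMaxRun]
          have hlr : (0 : Int) ≤ ((t.takeWhile (· == h)).length : Int) := by positivity
          omega

-- ===== VERDICT (by name: the statement is the Claim_ definition above) =====
theorem check_rapid_transactions_py_spec : Claim_equal_check_rapid_transactions_py := by
  intro ts _ _
  unfold Spec_check_rapid_transactions_py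
  unfold check_rapid_transactions_py check_rapid_transactions_py_alt
  by_cases hlen : ts.length < 2
  · simp [hlen]
  · simp only [hlen, if_false]
    set L := ts.filterMap pvExtractDate with hL
    rw [foldA_eq_filterMap, PySem.Dict.foldl_insert_getD_add_one_eq_counter,
      A_value_eq_cntMax]
    have hperm : (PySem.List.sorted L (fun x => x) false).Perm L :=
      PySem.List.sorted_perm L (fun x => x) false
    have hpw : (PySem.List.sorted L (fun x => x) false).Pairwise (· ≤ ·) := by
      simpa using PySem.List.sorted_pairwise L (fun x => x)
    rw [scan_sorted _ _ le_rfl hpw 0 0 none le_rfl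
        (fun x _ e => by simp at e),
      maxRun_eq_cntMax _ _ le_rfl hpw,
      ← cntMax_perm L _ hperm]
    rw [← hL]
    have := cntMax_nonneg L
    omega
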